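-- pv_equiv track=rewrite | github.com/balsis/indie_python | basics/function/get_word_indices.py | get_word_indices
-- ===== SOURCE A (Python) =====
-- def get_word_indices(my_list: list):
--     dct = {}
--     for i, value in enumerate(my_list):
--         for j, string in enumerate(value.lower().split()):
--             if string not in dct:
--                 dct[string] = []
--             dct[string].append(i)
--     return dct
-- ===== SOURCE B (Python) =====
-- def get_word_indices(my_list: list):
--     pairs = [(w, i) for i, line in enumerate(my_list) for w in line.lower().split()]
--     keys = dict.fromkeys(w for w, _ in pairs)
--     return {w: [i for x, i in pairs if x == w] for w in keys}
-- ===== Notes on version B (the rewrite author's own statement) =====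
-- stated objective: alternative
-- what changed: Replaces the incremental dict-of-appends with a flatten/dedup/filter decomposition: build the flat (word, line-index) pair list once, dedup the words in first-occurrence order, then build the result by one filtering comprehension per distinct word.
import Mathlib
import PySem

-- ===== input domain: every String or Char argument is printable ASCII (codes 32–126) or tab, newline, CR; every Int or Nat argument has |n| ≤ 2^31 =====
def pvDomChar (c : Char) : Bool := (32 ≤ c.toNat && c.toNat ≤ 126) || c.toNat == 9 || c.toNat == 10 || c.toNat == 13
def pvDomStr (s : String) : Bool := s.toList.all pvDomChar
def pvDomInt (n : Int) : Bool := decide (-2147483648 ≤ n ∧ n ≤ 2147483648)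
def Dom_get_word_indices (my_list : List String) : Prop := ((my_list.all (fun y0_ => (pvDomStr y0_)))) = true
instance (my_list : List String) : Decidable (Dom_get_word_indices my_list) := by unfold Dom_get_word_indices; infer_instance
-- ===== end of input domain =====

-- B replaces the incremental dict-of-appends with a flatten / dedup / per-word filter decomposition (alternative structure, same results).

-- ===== PORT A =====
def get_word_indices (my_list : List String) : List (String × List Int) :=
  let dct : PySem.Dict String (List Int) := PySem.Dict.empty
  let dct := (PySem.List.enumerate my_list).foldl (fun dct p =>
    (PySem.List.enumerate (PySem.Str.split₀ (PySem.Str.lower p.2))).foldl (fun dct q =>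
      let dct := if dct.contains q.2 then dct else dct.insert q.2 []
      dct.modify q.2 [] (fun l => l ++ [p.1])) dct) dct
  dct.items

-- ===== PORT B =====
def get_word_indices_alt (my_list : List String) : List (String × List Int) :=
  let pairs := (PySem.List.enumerate my_list).flatMap (fun p =>
    (PySem.Str.split₀ (PySem.Str.lower p.2)).map (fun w => (w, p.1)))
  let keys := PySem.List.dedup (pairs.map (·.1))
  keys.map (fun w => (w, (pairs.filter (fun x => x.1 == w)).map (·.2)))

-- ===== PRECONDITION & SPEC =====
def Spec_get_word_indices (my_list : List String) (out : List (String × List Int)) : Prop := out = get_word_indices_alt my_list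
instance (my_list : List String) (out : List (String × List Int)) : Decidable (Spec_get_word_indices my_list out) := by unfold Spec_get_word_indices; infer_instance

-- ===== CLAIM (what is proved, stated in full; the proofs are below) =====
def Claim_equal_get_word_indices : Prop := ∀ (my_list : List String), Dom_get_word_indices my_list → Spec_get_word_indices my_list (get_word_indices my_list)

-- ===== LEMMAS AND PROOFS =====

-- A's "if missing insert []; then append" step is exactly Dict.modify with default [].
theorem step_eq_modify (d : PySem.Dict String (List Int)) (w : String) (i : Int) :
    (if d.contains w then d else d.insert w []).modify w [] (fun l => l ++ [i])
      = d.modify w [] (fun l => l ++ [i]) := by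
  by_cases h : d.contains w
  · simp [h]
  · have h' : d.contains w = false := by simpa using h
    simp [h', PySem.Dict.modify, PySem.Dict.getD_insert_self, PySem.Dict.insert_insert_self,
      PySem.Dict.getD_of_not_contains]

-- the inner loop's enumerate index j is unused
theorem foldl_enumerate_snd {α β : Type} (l : List α) (s : Int) (f : β → α → β) (b : β) :
    (PySem.List.enumerate l s).foldl (fun acc q => f acc q.2) b = l.foldl f b := by
  induction l generalizing s b with
  | nil => simp [PySem.List.enumerate_nil]
  | cons x xs ih => simp [PySem.List.enumerate_cons, ih]

theorem get_word_indices_spec' (my_list : List String) :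
    get_word_indices my_list = get_word_indices_alt my_list := by
  unfold get_word_indices get_word_indices_alt
  simp only []
  set pairs := (PySem.List.enumerate my_list).flatMap (fun p =>
    (PySem.Str.split₀ (PySem.Str.lower p.2)).map (fun w => (w, p.1))) with hpairs
  have hfold : (PySem.List.enumerate my_list).foldl (fun dct p =>
      (PySem.List.enumerate (PySem.Str.split₀ (PySem.Str.lower p.2))).foldl (fun dct q =>
        (if dct.contains q.2 then dct else dct.insert q.2 []).modify q.2 [] (fun l => l ++ [p.1])) dct)
      PySem.Dict.empty
      = pairs.foldl (fun d p => d.modify p.1 [] (fun l => l ++ [p.2])) PySem.Dict.empty := by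
    rw [hpairs, List.foldl_flatMap]
    apply PySem.List.foldl_congr_mem
    intro d p _
    rw [List.foldl_map,
      foldl_enumerate_snd (PySem.Str.split₀ (PySem.Str.lower p.2)) 0
        (fun d w => (if d.contains w then d else d.insert w []).modify w [] (fun l => l ++ [p.1])) d]
    apply PySem.List.foldl_congr_mem
    intro d q _
    exact step_eq_modify d q p.1
  rw [hfold]
  set d := pairs.foldl (fun d p => d.modify p.1 [] (fun l => l ++ [p.2])) PySem.Dict.empty with hd
  have hnd : d.keys.Nodup := by
    rw [hd]
    exact PySem.Dict.nodup_keys_foldl_modify_key pairs Prod.fst [] (fun d p => fun l => l ++ [p.2])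
      PySem.Dict.empty (by simp)
  have hkeys : d.keys = PySem.List.dedup (pairs.map (·.1)) := by
    rw [hd, PySem.Dict.keys_foldl_modify_key]
    simp [PySem.Set.update_nil_left, PySem.Dict.keys_empty, PySem.List.dedup_eq_ofList]
  have hget : ∀ w, d.getD w [] = (pairs.filter (fun x => x.1 == w)).map (·.2) := by
    intro w
    rw [hd, PySem.Dict.getD_foldl_modify_append]
    simp [PySem.Dict.getD_empty]
  rw [PySem.Dict.items_eq_map_keys d hnd [], hkeys]
  apply List.map_congr_left
  intro w _
  rw [hget]

-- ===== VERDICT (by name: the statement is the Claim_ definition above) =====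
theorem get_word_indices_spec : Claim_equal_get_word_indices := by
  intro my_list _
  exact get_word_indices_spec' my_list
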